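-- pv_equiv track=rewrite | github.com/depictio/depictio | depictio/dash/modules/card_component/callbacks/core.py | _group_filters_by_dc
-- ===== SOURCE A (Python) =====
-- from typing import TYPE_CHECKING, Any
--
-- def _group_filters_by_dc(
--     metadata_list: list[dict[str, Any]] | None,
--     dc_configs_map: dict[str, dict[str, Any]],
-- ) -> dict[str, list[dict[str, Any]]]:
--     """
--     Group filter components by their data collection, filtering to table DCs only.
--
--     Groups interactive filter components by their associated data collection ID,
--     excluding non-table DC types (MultiQC, JBrowse2) that don't support filtering.
--
--     Args:
--         metadata_list: List of enriched filter component metadata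
--         dc_configs_map: Map of dc_id -> dc_config with type information
--
--     Returns:
--         Dict mapping dc_id (str) -> list of filter components for that DC
--     """
--     filters_by_dc: dict[str, list[dict[str, Any]]] = {}
--
--     if metadata_list:
--         for component in metadata_list:
--             component_dc = str(component.get("metadata", {}).get("dc_id"))
--             if component_dc not in filters_by_dc:
--                 filters_by_dc[component_dc] = []
--             filters_by_dc[component_dc].append(component)
--
--     # Filter to table DCs only
--     filters_by_dc_table_only: dict[str, list[dict[str, Any]]] = {}
--     for dc_key, dc_filters in filters_by_dc.items():
--         if dc_filters:
--             component_dc_config = dc_configs_map.get(str(dc_key), {})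
--             dc_type = component_dc_config.get("type", "table")
--             if dc_type == "table":
--                 filters_by_dc_table_only[dc_key] = dc_filters
--
--     return filters_by_dc_table_only
-- ===== SOURCE B (Python) =====
-- def _group_filters_by_dc(metadata_list, dc_configs_map):
--     """Single pass: filter to table DCs inline while grouping (no second pass)."""
--     result = {}
--     for component in (metadata_list or []):
--         dc = str(component.get("metadata", {}).get("dc_id"))
--         if dc_configs_map.get(dc, {}).get("type", "table") == "table":
--             result.setdefault(dc, []).append(component)
--     return result
-- ===== Notes on version B (the rewrite author's own statement) =====
-- stated objective: simpler
-- what changed: B fuses A's group-then-filter two-pass structure into one pass that checks the table-type of each component's data collection inline and only then inserts it, instead of building a full grouping dict and filtering it afterwards.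
import Mathlib
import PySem

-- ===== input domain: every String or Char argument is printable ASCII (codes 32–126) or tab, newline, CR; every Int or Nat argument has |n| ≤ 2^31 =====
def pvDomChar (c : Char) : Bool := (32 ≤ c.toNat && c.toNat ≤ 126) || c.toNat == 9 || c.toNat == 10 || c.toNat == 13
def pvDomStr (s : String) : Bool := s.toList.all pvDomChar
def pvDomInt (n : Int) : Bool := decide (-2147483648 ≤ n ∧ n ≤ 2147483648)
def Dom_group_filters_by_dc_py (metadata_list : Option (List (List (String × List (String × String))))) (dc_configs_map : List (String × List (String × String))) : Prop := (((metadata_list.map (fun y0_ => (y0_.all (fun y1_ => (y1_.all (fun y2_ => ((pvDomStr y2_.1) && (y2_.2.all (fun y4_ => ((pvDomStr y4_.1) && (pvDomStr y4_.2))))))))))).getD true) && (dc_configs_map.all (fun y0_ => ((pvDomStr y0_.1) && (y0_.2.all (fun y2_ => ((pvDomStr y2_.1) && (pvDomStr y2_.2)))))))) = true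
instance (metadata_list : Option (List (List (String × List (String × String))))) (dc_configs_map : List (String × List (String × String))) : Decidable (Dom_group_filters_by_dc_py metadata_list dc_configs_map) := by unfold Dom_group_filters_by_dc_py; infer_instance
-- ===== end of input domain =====

-- B fuses A's group-then-filter two passes into one pass that checks the table type inline (objective: simpler).

-- shared helper: Python dict.get on an association list (first match), d.get(k) / d.get(k, dflt)
def pvLookup {ν : Type} (l : List (String × ν)) (k : String) : Option ν :=
  (l.find? (fun p => p.1 == k)).map (·.2)

-- str(component.get("metadata", {}).get("dc_id")); str(None) = "None", str of a str is itself
def pvCompDC (c : List (String × List (String × String))) : String :=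
  ((pvLookup ((pvLookup c "metadata").getD []) "dc_id")).getD "None"

-- dc_configs_map.get(str(dc_key), {}).get("type", "table")
def pvDcType (dc_configs_map : List (String × List (String × String))) (k : String) : String :=
  (pvLookup ((pvLookup dc_configs_map k).getD []) "type").getD "table"

-- ===== PORT A =====
def group_filters_by_dc_py (metadata_list : Option (List (List (String × List (String × String))))) (dc_configs_map : List (String × List (String × String))) : List (String × List (List (String × List (String × String)))) :=
  -- first loop: group by component_dc (setdefault-style: create empty list, then append)
  let filters_by_dc : PySem.Dict String (List (List (String × List (String × String)))) :=
    match metadata_list with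
    | none => PySem.Dict.empty
    | some l =>
      l.foldl (fun d c =>
        let k := pvCompDC c
        let d := if d.contains k then d else d.insert k []
        d.insert k (d.getD k [] ++ [c])) PySem.Dict.empty
  -- second loop: keep only table DCs (and non-empty groups, which all are)
  let table_only : PySem.Dict String (List (List (String × List (String × String)))) :=
    filters_by_dc.items.foldl (fun acc p =>
      if p.2 = [] then acc
      else
        let dc_type := pvDcType dc_configs_map p.1
        if dc_type = "table" then acc.insert p.1 p.2 else acc) PySem.Dict.empty
  table_only.items

-- ===== PORT B =====
def group_filters_by_dc_py_alt (metadata_list : Option (List (List (String × List (String × String))))) (dc_configs_map : List (String × List (String × String))) : List (String × List (List (String × List (String × String)))) :=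
  ((metadata_list.getD []).foldl (fun d c =>
      let k := pvCompDC c
      if pvDcType dc_configs_map k = "table" then d.modify k [] (· ++ [c]) else d)
    PySem.Dict.empty).items

-- ===== PRECONDITION & SPEC =====
def Spec_group_filters_by_dc_py (metadata_list : Option (List (List (String × List (String × String))))) (dc_configs_map : List (String × List (String × String))) (out : List (String × List (List (String × List (String × String))))) : Prop := out = group_filters_by_dc_py_alt metadata_list dc_configs_map
instance (metadata_list : Option (List (List (String × List (String × String))))) (dc_configs_map : List (String × List (String × String))) (out : List (String × List (List (String × List (String × String))))) : Decidable (Spec_group_filters_by_dc_py metadata_list dc_configs_map out) := by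
  -- built stepwise: the one-shot instance search exceeds its default size on this nested type
  unfold Spec_group_filters_by_dc_py
  have h4 : DecidableEq (List (String × List (String × String))) := inferInstance
  have h5 : DecidableEq (List (List (String × List (String × String)))) := @List.hasDecEq _ h4
  have h6 : DecidableEq (String × List (List (String × List (String × String)))) := @instDecidableEqProd _ _ _ h5
  exact @List.hasDecEq _ h6 _ _

-- ===== CLAIM (what is proved, stated in full; the proofs are below) =====
def Claim_equal_group_filters_by_dc_py : Prop := ∀ (metadata_list : Option (List (List (String × List (String × String))))) (dc_configs_map : List (String × List (String × String))), Dom_group_filters_by_dc_py metadata_list dc_configs_map → Spec_group_filters_by_dc_py metadata_list dc_configs_map (group_filters_by_dc_py metadata_list dc_configs_map)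

-- ===== LEMMAS AND PROOFS =====

abbrev PvComp := List (String × List (String × String))
abbrev PvDict := PySem.Dict String (List PvComp)

-- the table predicate A's second pass and B's inline check both apply (depends on the key only)
def pvPred (cfg : List (String × List (String × String))) (p : String × List PvComp) : Bool :=
  pvDcType cfg p.1 == "table"

def pvStepA (d : PvDict) (c : PvComp) : PvDict :=
  d.insert (pvCompDC c) (d.getD (pvCompDC c) [] ++ [c])

def pvStepB (cfg : List (String × List (String × String))) (d : PvDict) (c : PvComp) : PvDict :=
  if pvDcType cfg (pvCompDC c) = "table" then d.insert (pvCompDC c) (d.getD (pvCompDC c) [] ++ [c]) else d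

-- A's loop body (create-empty-then-append) is one overwrite-insert
lemma pv_stepA_eq (d : PvDict) (c : PvComp) :
    (let k := pvCompDC c
     let d' := if d.contains k then d else d.insert k []
     d'.insert k (d'.getD k [] ++ [c])) = pvStepA d c := by
  by_cases hc : d.contains (pvCompDC c)
  · simp [hc, pvStepA]
  · simp only [eq_self_iff_true]
    rw [if_neg (by simp [hc])]
    rw [PySem.Dict.getD_insert_self, PySem.Dict.insert_insert_self, pvStepA,
        PySem.Dict.getD_of_not_contains _ _ (by simpa using hc)]

lemma pv_keys_sub (d e : PvDict) (cfg : List (String × List (String × String)))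
    (he : e.items = d.items.filter (pvPred cfg)) : e.keys.Sublist d.keys := by
  simp only [PySem.Dict.keys, he]
  exact List.Sublist.map _ List.filter_sublist

lemma pv_get_filter (d e : PvDict) (cfg : List (String × List (String × String))) (hnd : d.keys.Nodup)
    (he : e.items = d.items.filter (pvPred cfg)) (k : String) (hk : pvDcType cfg k = "table") :
    e.get? k = d.get? k := by
  cases h : d.get? k with
  | none =>
    have hk' : k ∉ d.keys := (PySem.Dict.get?_eq_none_iff_not_mem_keys d k).mp h
    exact (PySem.Dict.get?_eq_none_iff_not_mem_keys e k).mpr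
      (fun hm => hk' ((pv_keys_sub d e cfg he).mem hm))
  | some v =>
    have hm : (k, v) ∈ d.items := PySem.Dict.mem_items_of_get?_eq_some d h
    have hm' : (k, v) ∈ e.items := by
      rw [he, List.mem_filter]
      exact ⟨hm, by simp [pvPred, hk]⟩
    exact PySem.Dict.get?_of_mem_items e hm' ((pv_keys_sub d e cfg he).nodup hnd)

-- loop invariant: B's dict is A's grouping dict with non-table keys filtered out (order kept);
-- A's keys stay unique and its group values stay non-empty
lemma pv_inv (cfg : List (String × List (String × String))) (l : List PvComp) (d e : PvDict)
    (hnd : d.keys.Nodup) (hne : ∀ p ∈ d.items, p.2 ≠ [])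
    (he : e.items = d.items.filter (pvPred cfg)) :
    (l.foldl pvStepA d).keys.Nodup ∧
    (∀ p ∈ (l.foldl pvStepA d).items, p.2 ≠ []) ∧
    (l.foldl (pvStepB cfg) e).items = (l.foldl pvStepA d).items.filter (pvPred cfg) := by
  induction l generalizing d e with
  | nil => exact ⟨hnd, hne, he⟩
  | cons c t ih =>
    set k := pvCompDC c with hkdef
    set v' := d.getD k [] ++ [c] with hv'
    have hd'items := PySem.Dict.items_insert d k v'
    have hnd' : (d.insert k v').keys.Nodup := PySem.Dict.nodup_keys_insert d k v' hnd
    have hne' : ∀ p ∈ (d.insert k v').items, p.2 ≠ [] := by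
      intro p hp
      rw [hd'items] at hp
      by_cases hc : d.contains k
      · rw [if_pos hc] at hp
        obtain ⟨q, hq, hpq⟩ := List.mem_map.mp hp
        by_cases hq1 : q.1 == k
        · simp only [hq1, if_pos] at hpq; subst hpq; simp [hv']
        · simp only [hq1] at hpq; simp only [Bool.false_eq_true, if_false] at hpq
          subst hpq; exact hne q hq
      · rw [if_neg hc] at hp
        rcases List.mem_append.mp hp with h | h
        · exact hne p h
        · simp only [List.mem_singleton] at h; subst h; simp [hv']
    by_cases hp : pvDcType cfg k = "table"
    · -- table key: B inserts too, and looks up the same current group value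
      have hstepB : pvStepB cfg e c = e.insert k (e.getD k [] ++ [c]) := by
        simp only [pvStepB]; rw [if_pos hp]
      have hget : e.get? k = d.get? k := pv_get_filter d e cfg hnd he k hp
      have hgetD : e.getD k [] = d.getD k [] := by
        rw [PySem.Dict.getD_eq_get?_getD, PySem.Dict.getD_eq_get?_getD, hget]
      have hcont : e.contains k = d.contains k := by
        rw [PySem.Dict.contains_eq_isSome_get?, PySem.Dict.contains_eq_isSome_get?, hget]
      have he' : (e.insert k (e.getD k [] ++ [c])).items = (d.insert k v').items.filter (pvPred cfg) := by
        rw [hgetD, ← hv', hd'items, PySem.Dict.items_insert]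
        by_cases hc : d.contains k
        · rw [if_pos hc, if_pos (by rw [hcont]; exact hc), he, List.filter_map]
          congr 1
          apply List.filter_congr
          intro q hq
          by_cases hq1 : q.1 == k
          · have hqk : q.1 = k := by simpa using hq1
            simp [Function.comp, hq1, pvPred, hqk, hp]
          · simp [Function.comp, hq1]
        · rw [if_neg hc, if_neg (by rw [hcont]; simpa using hc), he, List.filter_append]
          simp [pvPred, hp]
      have := ih (d.insert k v') (e.insert k (e.getD k [] ++ [c])) hnd' hne' he'
      simpa [List.foldl_cons, pvStepA, hstepB, ← hkdef, ← hv'] using this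
    · -- non-table key: B skips; A's new/updated entry is filtered out either way
      have hstepB : pvStepB cfg e c = e := by
        simp only [pvStepB]; rw [if_neg hp]
      have he' : e.items = (d.insert k v').items.filter (pvPred cfg) := by
        rw [hd'items]
        by_cases hc : d.contains k
        · rw [if_pos hc, List.filter_map, he]
          have h1 : (d.items.filter (pvPred cfg ∘ fun p => if p.1 == k then (k, v') else p)) = d.items.filter (pvPred cfg) := by
            apply List.filter_congr
            intro q hq
            by_cases hq1 : q.1 == k
            · have hqk : q.1 = k := by simpa using hq1
              simp [Function.comp, hq1, pvPred, hqk, hp]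
            · simp [Function.comp, hq1]
          rw [h1]
          have h2 : ∀ q ∈ d.items.filter (pvPred cfg), (fun p => if p.1 == k then (k, v') else p) q = q := by
            intro q hq
            have hqt : pvDcType cfg q.1 = "table" := by
              simpa [pvPred] using (List.mem_filter.mp hq).2
            have hq1 : ¬ (q.1 == k) := by
              intro hb
              exact hp (by rwa [(by simpa using hb : q.1 = k)] at hqt)
            simp [hq1]
          rw [List.map_congr_left h2, List.map_id']
        · rw [if_neg hc, List.filter_append, he]
          simp [pvPred, hp]
      have := ih (d.insert k v') e hnd' hne' he'
      simpa [List.foldl_cons, pvStepA, hstepB, ← hkdef, ← hv'] using this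

-- A's second pass over nodup keys and non-empty values appends exactly the table-keyed items
lemma pv_pass2 (cfg : List (String × List (String × String))) (l : List (String × List PvComp)) (acc : PvDict)
    (hl : (l.map (·.1)).Nodup) (hv : ∀ p ∈ l, p.2 ≠ [])
    (hacc : ∀ p ∈ l, acc.contains p.1 = false) :
    (l.foldl (fun acc p =>
        if p.2 = [] then acc
        else if pvDcType cfg p.1 = "table" then acc.insert p.1 p.2 else acc) acc).items
      = acc.items ++ l.filter (pvPred cfg) := by
  induction l generalizing acc with
  | nil => simp
  | cons q t ih =>
    have hq2 : q.2 ≠ [] := hv q (by simp)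
    simp only [List.foldl_cons, if_neg hq2]
    have hlt : (t.map (·.1)).Nodup := by simpa using (List.nodup_cons.mp (by simpa using hl)).2
    have hknot : q.1 ∉ t.map (·.1) := (List.nodup_cons.mp (by simpa using hl)).1
    by_cases hp : pvDcType cfg q.1 = "table"
    · rw [if_pos hp]
      have hacc' : ∀ p ∈ t, (acc.insert q.1 q.2).contains p.1 = false := by
        intro p hpmem
        rw [PySem.Dict.contains_insert]
        have h1 : ¬ (p.1 == q.1) := by
          intro hb
          exact hknot (List.mem_map.mpr ⟨p, hpmem, (by simpa using hb : p.1 = q.1)⟩)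
        simp only [h1]
        simp only [Bool.false_or]
        exact hacc p (by simp [hpmem])
      rw [ih (acc.insert q.1 q.2) hlt (fun p hp2 => hv p (by simp [hp2])) hacc',
          PySem.Dict.items_insert_of_not_contains acc q.2 (hacc q (by simp))]
      simp [pvPred, hp]
    · rw [if_neg hp, ih acc hlt (fun p hp2 => hv p (by simp [hp2])) (fun p hp2 => hacc p (by simp [hp2]))]
      simp [pvPred, hp]

-- ===== VERDICT (by name: the statement is the Claim_ definition above) =====
theorem group_filters_by_dc_py_spec : Claim_equal_group_filters_by_dc_py := by
  intro ml cfg _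
  unfold Spec_group_filters_by_dc_py group_filters_by_dc_py group_filters_by_dc_py_alt
  have hfnA : (fun (d : PvDict) (c : PvComp) =>
      let k := pvCompDC c
      let d := if d.contains k then d else d.insert k []
      d.insert k (d.getD k [] ++ [c])) = pvStepA :=
    funext fun d => funext fun c => pv_stepA_eq d c
  have hfnB : (fun (d : PvDict) (c : PvComp) =>
      let k := pvCompDC c
      if pvDcType cfg k = "table" then d.modify k [] (· ++ [c]) else d) = pvStepB cfg := rfl
  cases ml with
  | none => rfl
  | some l =>
    simp only [Option.getD_some]
    rw [hfnA, hfnB]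
    obtain ⟨hnd', hne', hB⟩ := pv_inv cfg l PySem.Dict.empty PySem.Dict.empty
      (by simp [PySem.Dict.keys_empty]) (by intro p hp; simp [PySem.Dict.empty] at hp)
      (by simp [PySem.Dict.empty])
    rw [pv_pass2 cfg _ PySem.Dict.empty (by simpa [PySem.Dict.keys] using hnd') hne'
        (fun p _ => PySem.Dict.contains_empty p.1), hB]
    simp [PySem.Dict.empty]
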